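-- pv_equiv track=rewrite | github.com/pablo-1974/AGB-ausencias | absences_router.py | mask_to_human
-- ===== SOURCE A (Python) =====
-- from typing import Optional, List, Tuple
--
-- HOUR_LABELS = ["1ª", "2ª", "3ª", "Recreo", "4ª", "5ª", "6ª"]
--
-- def make_mask_all():
--     """Máscara que representa TODAS las horas (0–6)."""
--     return (1 << 7) - 1
--
-- def mask_to_human(mask: int) -> str:
--     """Convierte una máscara de horas en formato legible (ej. '1ª-3ª')."""
--     if mask <= 0:
--         return "—"
--     if mask == make_mask_all():
--         return "Todas"
--
--     on = [i for i in range(7) if (mask >> i) & 1]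
--     if not on:
--         return "—"
--
--     ranges: List[Tuple[int, int]] = []
--     start = prev = on[0]
--
--     for i in on[1:]:
--         if i == prev + 1:
--             prev = i
--         else:
--             ranges.append((start, prev))
--             start = prev = i
--     ranges.append((start, prev))
--
--     parts = []
--     for a, b in ranges:
--         if a == b:
--             parts.append(HOUR_LABELS[a])
--         else:
--             parts.append(f"{HOUR_LABELS[a]}-{HOUR_LABELS[b]}")
--     return ", ".join(parts)
-- ===== SOURCE B (Python) =====
-- HOUR_LABELS = ["1ª", "2ª", "3ª", "Recreo", "4ª", "5ª", "6ª"]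
--
-- def mask_to_human(mask: int) -> str:
--     """Single pass over the 7 bits with a run flag; no intermediate 'on' list."""
--     if mask <= 0:
--         return "—"
--     if mask == 127:
--         return "Todas"
--     parts = []
--     start = 0
--     in_run = False
--     for i in range(7):
--         if (mask >> i) & 1:
--             if not in_run:
--                 start = i
--                 in_run = True
--         else:
--             if in_run:
--                 parts.append(HOUR_LABELS[start] if start == i - 1 else HOUR_LABELS[start] + "-" + HOUR_LABELS[i - 1])
--                 in_run = False
--     if in_run:
--         parts.append(HOUR_LABELS[start] if start == 6 else HOUR_LABELS[start] + "-" + HOUR_LABELS[6])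
--     return ", ".join(parts) if parts else "—"
-- ===== Notes on version B (the rewrite author's own statement) =====
-- stated objective: simpler
-- what changed: Replaced A's three passes (build the 'on' index list, group it into (start,end) ranges, then format) by a single pass over the 7 bits maintaining a run flag and start index, formatting each run as its falling edge is seen.
import Mathlib
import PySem

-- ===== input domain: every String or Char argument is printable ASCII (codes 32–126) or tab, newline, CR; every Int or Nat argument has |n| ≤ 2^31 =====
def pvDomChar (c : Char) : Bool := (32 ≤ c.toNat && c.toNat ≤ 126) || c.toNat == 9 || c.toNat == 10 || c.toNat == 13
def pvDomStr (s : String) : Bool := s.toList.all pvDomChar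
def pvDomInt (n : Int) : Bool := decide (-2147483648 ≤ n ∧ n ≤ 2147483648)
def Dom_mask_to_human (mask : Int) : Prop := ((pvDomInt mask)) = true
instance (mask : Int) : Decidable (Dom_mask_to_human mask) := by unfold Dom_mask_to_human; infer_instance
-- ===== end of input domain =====

-- B replaces A's three passes (index list, grouping into ranges, formatting) by one pass over
-- the 7 bits with a run flag, emitting each formatted run at its falling edge ('simpler').

-- ===== PORT A =====
def HOUR_LABELS : List String := ["1ª", "2ª", "3ª", "Recreo", "4ª", "5ª", "6ª"]

def make_mask_all : Int := (1 <<< 7) - 1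

-- the code of A after its two guards (extracted as a helper; called once below)
def pvBodyA (mask : Int) : String :=
  let on := (PySem.List.pyRange 0 7 1).filter (fun i => PySem.Int.band (mask >>> i.toNat) 1 != 0)
  match on with
  | [] => "—"
  | h :: t =>
    -- start = prev = on[0]; for i in on[1:]: …
    let st := t.foldl (fun (st : List (Int × Int) × Int × Int) i =>
        if i = st.2.2 + 1 then (st.1, st.2.1, i)
        else (st.1 ++ [(st.2.1, st.2.2)], i, i)) ([], h, h)
    let ranges := st.1 ++ [(st.2.1, st.2.2)]
    let parts := ranges.map (fun ab =>
      if ab.1 = ab.2 then PySem.List.pyGetD HOUR_LABELS ab.1 ""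
      else PySem.Str.join "" [PySem.List.pyGetD HOUR_LABELS ab.1 "", "-", PySem.List.pyGetD HOUR_LABELS ab.2 ""])
    PySem.Str.join ", " parts

def mask_to_human (mask : Int) : String :=
  if mask ≤ 0 then "—"
  else if mask = make_mask_all then "Todas"
  else pvBodyA mask

-- ===== PORT B =====
-- the code of B after its two guards (extracted as a helper; called once below)
def pvBodyB (mask : Int) : String :=
  -- state: (parts, start, in_run)
  let st := (PySem.List.pyRange 0 7 1).foldl (fun (st : List String × Int × Bool) i =>
      if PySem.Int.band (mask >>> i.toNat) 1 != 0 then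
        if !st.2.2 then (st.1, i, true) else st
      else
        if st.2.2 then
          (st.1 ++ [if st.2.1 = i - 1 then PySem.List.pyGetD HOUR_LABELS st.2.1 ""
                    else PySem.Str.join "" [PySem.List.pyGetD HOUR_LABELS st.2.1 "", "-", PySem.List.pyGetD HOUR_LABELS (i - 1) ""]],
           st.2.1, false)
        else st) ([], 0, false)
  let parts := if st.2.2 then
      st.1 ++ [if st.2.1 = 6 then PySem.List.pyGetD HOUR_LABELS st.2.1 ""
               else PySem.Str.join "" [PySem.List.pyGetD HOUR_LABELS st.2.1 "", "-", PySem.List.pyGetD HOUR_LABELS 6 ""]]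
    else st.1
  if parts ≠ [] then PySem.Str.join ", " parts else "—"

def mask_to_human_alt (mask : Int) : String :=
  if mask ≤ 0 then "—"
  else if mask = 127 then "Todas"
  else pvBodyB mask

-- ===== PRECONDITION & SPEC =====
def Spec_mask_to_human (mask : Int) (out : String) : Prop := out = mask_to_human_alt mask
instance (mask : Int) (out : String) : Decidable (Spec_mask_to_human mask out) := by unfold Spec_mask_to_human; infer_instance

-- ===== CLAIM (what is proved, stated in full; the proofs are below) =====
def Claim_equal_mask_to_human : Prop := ∀ (mask : Int), Dom_mask_to_human mask → Spec_mask_to_human mask (mask_to_human mask)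

-- ===== LEMMAS AND PROOFS =====

-- a bit among the low seven depends only on mask % 128
theorem pv_bit_mod (mask : Int) (h : 0 ≤ mask) (i : Int) (h0 : 0 ≤ i) (h7 : i < 7) :
    PySem.Int.band (mask >>> (↑i.toNat : Int)) 1 = PySem.Int.band ((mask % 128) >>> (↑i.toNat : Int)) 1 := by
  rw [Int.shiftRight_natCast_right, Int.shiftRight_natCast_right, PySem.Int.band_one, PySem.Int.band_one,
      Int.shiftRight_eq_div_pow, Int.shiftRight_eq_div_pow]
  simp only [PySem.Int.mod_eq_emod_of_pos (by norm_num : (0:Int) < 2)]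
  have hk : i.toNat < 7 := by omega
  set k := i.toNat with hkdef
  interval_cases k <;> (norm_num; all_goals omega)

theorem pv_bodyA_mod (mask : Int) (h : 0 ≤ mask) : pvBodyA mask = pvBodyA (mask % 128) := by
  have hf : (PySem.List.pyRange 0 7 1).filter (fun i => PySem.Int.band (mask >>> i.toNat) 1 != 0)
      = (PySem.List.pyRange 0 7 1).filter (fun i => PySem.Int.band ((mask % 128) >>> i.toNat) 1 != 0) := by
    apply List.filter_congr
    intro i hi
    rw [PySem.List.mem_pyRange_one] at hi
    rw [pv_bit_mod mask h i hi.1 hi.2]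
  simp only [pvBodyA, hf]

theorem pv_bodyB_mod (mask : Int) (h : 0 ≤ mask) : pvBodyB mask = pvBodyB (mask % 128) := by
  unfold pvBodyB
  have hf : ∀ (st : List String × Int × Bool) (i : Int), i ∈ PySem.List.pyRange 0 7 1 →
      (fun (st : List String × Int × Bool) i =>
        if PySem.Int.band (mask >>> i.toNat) 1 != 0 then
          if !st.2.2 then (st.1, i, true) else st
        else
          if st.2.2 then
            (st.1 ++ [if st.2.1 = i - 1 then PySem.List.pyGetD HOUR_LABELS st.2.1 ""
                      else PySem.Str.join "" [PySem.List.pyGetD HOUR_LABELS st.2.1 "", "-", PySem.List.pyGetD HOUR_LABELS (i - 1) ""]],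
             st.2.1, false)
          else st) st i
      = (fun (st : List String × Int × Bool) i =>
        if PySem.Int.band ((mask % 128) >>> i.toNat) 1 != 0 then
          if !st.2.2 then (st.1, i, true) else st
        else
          if st.2.2 then
            (st.1 ++ [if st.2.1 = i - 1 then PySem.List.pyGetD HOUR_LABELS st.2.1 ""
                      else PySem.Str.join "" [PySem.List.pyGetD HOUR_LABELS st.2.1 "", "-", PySem.List.pyGetD HOUR_LABELS (i - 1) ""]],
             st.2.1, false)
          else st) st i := by
    intro st i hi
    rw [PySem.List.mem_pyRange_one] at hi
    simp only [pv_bit_mod mask h i hi.1 hi.2]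
  rw [PySem.List.foldl_congr_mem _ _ _ _ hf]

set_option maxRecDepth 8192 in
theorem pv_bodies_eq : ∀ n : Fin 128, pvBodyA ((n : Nat) : Int) = pvBodyB ((n : Nat) : Int) := by
  decide

-- ===== VERDICT (by name: the statement is the Claim_ definition above) =====
theorem mask_to_human_spec : Claim_equal_mask_to_human := by
  intro mask _
  unfold Spec_mask_to_human mask_to_human mask_to_human_alt
  have hmma : make_mask_all = 127 := by decide
  rw [hmma]
  by_cases h1 : mask ≤ 0
  · simp [h1]
  · by_cases h2 : mask = 127
    · simp [h2]
    · simp only [if_neg h1, if_neg h2]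
      rw [pv_bodyA_mod mask (by omega), pv_bodyB_mod mask (by omega)]
      have hb : (0:Int) ≤ mask % 128 := Int.emod_nonneg _ (by norm_num)
      have hub : mask % 128 < 128 := Int.emod_lt_of_pos _ (by norm_num)
      have : mask % 128 = (((⟨(mask % 128).toNat, by omega⟩ : Fin 128) : Nat) : Int) := by
        simp; omega
      rw [this]
      exact pv_bodies_eq _
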